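-- pv_equiv track=rewrite | github.com/LaryPop26/UBB-CS | FirstSemester/Programming fundamentals/Labs/lab2/functions.py | maxim_din_n
-- ===== SOURCE A (Python) =====
-- def frequency(n):    # 8, 10
--     """
--     Determine the frequency of each digit in n
--     :param n: an integer value
--     :return: cifre - list of frequency
--     """
--     cifre = [0, 0, 0, 0, 0, 0, 0, 0, 0, 0]
--     while n > 0:
--         cifre[n % 10] += 1
--         n = n//10
--     return cifre
--
-- def maxim_din_n(n):     # 8
--     """
--     The maximum number is formed with the digits given by going through the frequency list
--     :param n: an integer value
--     :return: m - an integer value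
--     """
--     cifre = frequency(n)
--     m = 0
--     for i in range(9, -1, -1):
--         while cifre[i] > 0:
--             m = m * 10 + i
--             cifre[i] -= 1
--     return m
-- ===== SOURCE B (Python) =====
-- def maxim_din_n(n):
--     if n <= 0:
--         return 0
--     digits = []
--     while n > 0:
--         digits.append(n % 10)
--         n //= 10
--     digits.sort(reverse=True)
--     m = 0
--     for d in digits:
--         m = m * 10 + d
--     return m
-- ===== Notes on version B (the rewrite author's own statement) =====
-- stated objective: simpler
-- what changed: Replaces A's counting sort over a fixed digit-frequency table (build frequencies, then scan buckets from highest to lowest with a nested draining while-loop) by collecting the digits into a list, comparison-sorting it descending, and folding it into the number.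
import Mathlib
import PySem

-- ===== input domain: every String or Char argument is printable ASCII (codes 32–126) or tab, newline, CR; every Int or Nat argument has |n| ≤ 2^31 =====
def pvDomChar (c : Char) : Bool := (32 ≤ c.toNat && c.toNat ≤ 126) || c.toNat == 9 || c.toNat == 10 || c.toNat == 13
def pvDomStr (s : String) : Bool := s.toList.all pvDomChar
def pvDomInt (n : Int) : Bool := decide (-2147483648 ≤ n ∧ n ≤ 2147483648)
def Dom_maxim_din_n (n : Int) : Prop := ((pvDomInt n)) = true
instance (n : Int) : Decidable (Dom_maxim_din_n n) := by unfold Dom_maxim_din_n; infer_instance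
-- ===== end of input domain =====

-- B replaces A's counting sort over a digit-frequency table by collecting the
-- digits, comparison-sorting them descending and folding; objective: simpler.

-- helper cited by pvInnerLoop's termination proof (and reused below)
theorem pv_getD_set_self (l : List Int) (i : Nat) (a : Int) (h : i < l.length) :
    (l.set i a).getD i 0 = a := by
  simp [List.getD, List.getElem?_set_self h]

-- ===== PORT A =====
-- while n > 0: cifre[n % 10] += 1; n = n // 10   (the index n % 10 is in 0..9, so `.toNat` is exact)
def pvFreqLoop (n : Int) (cifre : List Int) : List Int :=
  if _h : 0 < n then
    pvFreqLoop (PySem.Int.floordiv n 10)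
      (cifre.set (PySem.Int.mod n 10).toNat (cifre.getD (PySem.Int.mod n 10).toNat 0 + 1))
  else cifre
termination_by n.toNat
decreasing_by
  rw [PySem.Int.floordiv_eq_ediv_of_pos (by norm_num)]
  omega

def pvFrequency (n : Int) : List Int := pvFreqLoop n [0, 0, 0, 0, 0, 0, 0, 0, 0, 0]

-- while cifre[i] > 0: m = m * 10 + i; cifre[i] -= 1   (i comes from range(9,-1,-1), so `.toNat` is exact)
def pvInnerLoop (cifre : List Int) (i m : Int) : List Int × Int :=
  if h : 0 < cifre.getD i.toNat 0 then
    pvInnerLoop (cifre.set i.toNat (cifre.getD i.toNat 0 - 1)) i (m * 10 + i)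
  else (cifre, m)
termination_by (cifre.getD i.toNat 0).toNat
decreasing_by
  by_cases hlen : i.toNat < cifre.length
  · rw [pv_getD_set_self _ _ _ hlen]; omega
  · exfalso
    have : cifre.getD i.toNat 0 = 0 := by
      simp [List.getD, List.getElem?_eq_none (by omega : cifre.length ≤ i.toNat)]
    omega

def maxim_din_n (n : Int) : Int :=
  ((PySem.List.pyRange 9 (-1) (-1)).foldl (fun st i => pvInnerLoop st.1 i st.2)
    (pvFrequency n, 0)).2

-- ===== PORT B =====
-- while n > 0: digits.append(n % 10); n //= 10
def pvDigitsLoop (n : Int) (digits : List Int) : List Int :=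
  if _h : 0 < n then pvDigitsLoop (PySem.Int.floordiv n 10) (digits ++ [PySem.Int.mod n 10])
  else digits
termination_by n.toNat
decreasing_by
  rw [PySem.Int.floordiv_eq_ediv_of_pos (by norm_num)]
  omega

def maxim_din_n_alt (n : Int) : Int :=
  if n ≤ 0 then 0
  else
    (PySem.List.sorted (pvDigitsLoop n []) (fun x => x) true).foldl (fun m d => m * 10 + d) 0

-- ===== PRECONDITION & SPEC =====
def Spec_maxim_din_n (n : Int) (out : Int) : Prop := out = maxim_din_n_alt n
instance (n : Int) (out : Int) : Decidable (Spec_maxim_din_n n out) := by unfold Spec_maxim_din_n; infer_instance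

-- ===== CLAIM (what is proved, stated in full; the proofs are below) =====
def Claim_equal_maxim_din_n : Prop := ∀ (n : Int), Dom_maxim_din_n n → Spec_maxim_din_n n (maxim_din_n n)

-- ===== LEMMAS AND PROOFS =====

theorem pv_getD_set_ne (l : List Int) (i j : Nat) (a : Int) (h : i ≠ j) :
    (l.set i a).getD j 0 = l.getD j 0 := by
  simp [List.getD, List.getElem?_set_ne h]

theorem pvDigitsLoop_acc : ∀ (k : Nat) (n : Int), n.toNat ≤ k → ∀ (acc : List Int),
    pvDigitsLoop n acc = acc ++ pvDigitsLoop n [] := by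
  intro k
  induction k with
  | zero =>
    intro n hn acc
    have h : ¬ 0 < n := by omega
    have h0 : pvDigitsLoop n [] = [] := by rw [pvDigitsLoop, dif_neg h]
    rw [pvDigitsLoop, dif_neg h, h0, List.append_nil]
  | succ k ih =>
    intro n hn acc
    by_cases h : 0 < n
    · have hd : (PySem.Int.floordiv n 10).toNat ≤ k := by
        rw [PySem.Int.floordiv_eq_ediv_of_pos (by norm_num)]; omega
      conv_lhs => rw [pvDigitsLoop]
      conv_rhs => rw [pvDigitsLoop]
      rw [dif_pos h, dif_pos h, ih _ hd, ih _ hd ([] ++ [PySem.Int.mod n 10])]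
      simp
    · have h0 : pvDigitsLoop n [] = [] := by rw [pvDigitsLoop, dif_neg h]
      rw [pvDigitsLoop, dif_neg h, h0, List.append_nil]

-- the digit list of n (B's loop with empty accumulator), least-significant digit first
def pvDigs (n : Int) : List Int := pvDigitsLoop n []

theorem pvDigs_eq (n : Int) :
    pvDigs n = if 0 < n then PySem.Int.mod n 10 :: pvDigs (PySem.Int.floordiv n 10) else [] := by
  unfold pvDigs
  conv_lhs => rw [pvDigitsLoop]
  split
  · rw [pvDigitsLoop_acc (PySem.Int.floordiv n 10).toNat _ le_rfl]
    rfl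
  · rfl

theorem pv_mod10_bounds (n : Int) : 0 ≤ PySem.Int.mod n 10 ∧ PySem.Int.mod n 10 ≤ 9 := by
  rw [PySem.Int.mod_eq_emod_of_pos (by norm_num)]
  have h1 := Int.emod_nonneg n (b := 10) (by norm_num)
  have h2 := Int.emod_lt_of_pos n (b := 10) (by norm_num)
  omega

theorem pvDigs_mem : ∀ (k : Nat) (n : Int), n.toNat ≤ k → ∀ d ∈ pvDigs n, 0 ≤ d ∧ d ≤ 9 := by
  intro k
  induction k with
  | zero =>
    intro n hn d hd
    rw [pvDigs_eq, if_neg (by omega)] at hd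
    simp at hd
  | succ k ih =>
    intro n hn d hd
    rw [pvDigs_eq] at hd
    by_cases h : 0 < n
    · rw [if_pos h] at hd
      rcases List.mem_cons.mp hd with rfl | hd
      · exact pv_mod10_bounds n
      · refine ih (PySem.Int.floordiv n 10) ?_ d hd
        rw [PySem.Int.floordiv_eq_ediv_of_pos (by norm_num)]; omega
    · rw [if_neg h] at hd; simp at hd

theorem pvFreqLoop_count : ∀ (k : Nat) (n : Int), n.toNat ≤ k →
    ∀ (cifre : List Int) (j : Nat), cifre.length = 10 → j < 10 →
    (pvFreqLoop n cifre).getD j 0 = cifre.getD j 0 + ((pvDigs n).count (j : Int) : Int) := by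
  intro k
  induction k with
  | zero =>
    intro n hn cifre j _ _
    rw [pvFreqLoop, dif_neg (by omega : ¬ 0 < n), pvDigs_eq, if_neg (by omega : ¬ 0 < n)]
    simp
  | succ k ih =>
    intro n hn cifre j hlen hj
    by_cases h : 0 < n
    · have hdig := pv_mod10_bounds n
      have hrec : (PySem.Int.floordiv n 10).toNat ≤ k := by
        rw [PySem.Int.floordiv_eq_ediv_of_pos (by norm_num)]; omega
      rw [pvFreqLoop, dif_pos h, ih _ hrec _ j (by simpa using hlen) hj]
      conv_rhs => rw [pvDigs_eq]
      rw [if_pos h]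
      by_cases hij : (PySem.Int.mod n 10).toNat = j
      · subst hij
        have hjeq : (((PySem.Int.mod n 10).toNat : Nat) : Int) = PySem.Int.mod n 10 := by omega
        rw [pv_getD_set_self _ _ _ (by omega), hjeq, List.count_cons_self]
        push_cast
        ring
      · rw [pv_getD_set_ne _ _ _ _ hij,
          List.count_cons_of_ne (show PySem.Int.mod n 10 ≠ (j : Int) by omega)]
    · rw [pvFreqLoop, dif_neg h, pvDigs_eq, if_neg h]
      simp

theorem pvInner_spec (k : Nat) :
    ∀ (cifre : List Int) (i m : Int), 0 ≤ i → cifre.getD i.toNat 0 = (k : Int) →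
    pvInnerLoop cifre i m =
      (cifre.set i.toNat 0, (List.replicate k i).foldl (fun m d => m * 10 + d) m) := by
  induction k with
  | zero =>
    intro cifre i m _ hk
    rw [pvInnerLoop]
    rw [hk]
    simp only [Nat.cast_zero, lt_self_iff_false, dite_false, List.replicate_zero, List.foldl_nil]
    congr 1
    by_cases hlen : i.toNat < cifre.length
    · have h0 : cifre[i.toNat] = 0 := by
        rw [List.getD, List.getElem?_eq_getElem hlen] at hk
        simpa using hk
      conv_rhs => rw [← h0]
      exact (List.set_getElem_self hlen).symm
    · exact (List.set_eq_of_length_le (by omega)).symm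
  | succ k ih =>
    intro cifre i m hi hk
    have hpos : 0 < cifre.getD i.toNat 0 := by rw [hk]; positivity
    have hlen : i.toNat < cifre.length := by
      by_contra hle
      have : cifre.getD i.toNat 0 = 0 := by
        simp [List.getD, List.getElem?_eq_none (by omega : cifre.length ≤ i.toNat)]
      omega
    rw [pvInnerLoop, dif_pos hpos]
    have hk' : (cifre.set i.toNat (cifre.getD i.toNat 0 - 1)).getD i.toNat 0 = (k : Int) := by
      rw [pv_getD_set_self _ _ _ hlen, hk]; push_cast; ring
    rw [ih _ i (m * 10 + i) hi hk', List.set_set, List.replicate_succ, List.foldl_cons]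

theorem pvOuter_spec (is : List Int) :
    ∀ (cifre : List Int) (m : Int),
    (∀ i ∈ is, 0 ≤ i) → (∀ i ∈ is, 0 ≤ cifre.getD i.toNat 0) → is.Pairwise (· ≠ ·) →
    (is.foldl (fun st i => pvInnerLoop st.1 i st.2) (cifre, m)).2 =
      (is.flatMap (fun i => List.replicate (cifre.getD i.toNat 0).toNat i)).foldl
        (fun m d => m * 10 + d) m := by
  induction is with
  | nil => intro cifre m _ _ _; rfl
  | cons i rest ih =>
    intro cifre m hnn hge hpw
    have hi : 0 ≤ i := hnn i (by simp)
    have hgi : 0 ≤ cifre.getD i.toNat 0 := hge i (by simp)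
    have hk : cifre.getD i.toNat 0 = (((cifre.getD i.toNat 0).toNat : Nat) : Int) := by omega
    have hstep := pvInner_spec (cifre.getD i.toNat 0).toNat cifre i m hi hk
    rw [List.foldl_cons]
    show (List.foldl _ (pvInnerLoop cifre i m) rest).2 = _
    rw [hstep, List.flatMap_cons, List.foldl_append]
    have hge' : ∀ j ∈ rest, 0 ≤ (cifre.set i.toNat 0).getD j.toNat 0 := by
      intro j hj
      by_cases hij : i.toNat = j.toNat
      · by_cases hlen : i.toNat < cifre.length
        · rw [← hij, pv_getD_set_self _ _ _ hlen]
        · rw [List.set_eq_of_length_le (by omega)]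
          exact hge j (by simp [hj])
      · rw [pv_getD_set_ne _ _ _ _ hij]
        exact hge j (by simp [hj])
    rw [ih _ _ (fun j hj => hnn j (by simp [hj])) hge' hpw.of_cons]
    congr 1
    rw [List.flatMap_def, List.flatMap_def]
    congr 1
    apply List.map_congr_left
    intro j hj
    have hij : i.toNat ≠ j.toNat := by
      have h1 : i ≠ j := List.rel_of_pairwise_cons hpw hj
      have h2 : 0 ≤ j := hnn j (by simp [hj])
      omega
    rw [pv_getD_set_ne _ _ _ _ hij]

-- the digits of n laid out in descending order, digit i repeated count-of-i times
def pvDescList (n : Int) : List Int :=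
  ([9, 8, 7, 6, 5, 4, 3, 2, 1, 0] : List Int).flatMap
    (fun i => List.replicate ((pvDigs n).count i) i)

theorem pvFrequency_count (n : Int) (j : Nat) (hj : j < 10) :
    (pvFrequency n).getD j 0 = ((pvDigs n).count (j : Int) : Int) := by
  rw [pvFrequency, pvFreqLoop_count n.toNat n le_rfl _ j rfl hj]
  have : ([0, 0, 0, 0, 0, 0, 0, 0, 0, 0] : List Int).getD j 0 = 0 := by
    interval_cases j <;> rfl
  rw [this, zero_add]

theorem pvA_char (n : Int) :
    maxim_din_n n = (pvDescList n).foldl (fun m d => m * 10 + d) 0 := by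
  unfold maxim_din_n
  have hr : PySem.List.pyRange 9 (-1) (-1) = ([9, 8, 7, 6, 5, 4, 3, 2, 1, 0] : List Int) := by rfl
  rw [hr]
  rw [pvOuter_spec _ _ _ (by decide)
    (by
      intro i hi
      fin_cases hi <;>
        · rw [pvFrequency_count n _ (by norm_num)]
          positivity)
    (by decide)]
  unfold pvDescList
  rw [List.flatMap_def, List.flatMap_def]
  congr 2
  apply List.map_congr_left
  intro i hi
  fin_cases hi <;>
    · rw [pvFrequency_count n _ (by norm_num)]
      norm_num

theorem pv_desc_pairwise (is : List Int) (f : Int → Nat) (h : is.Pairwise (fun a b => b ≤ a)) :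
    (is.flatMap (fun i => List.replicate (f i) i)).Pairwise (fun a b => b ≤ a) := by
  induction is with
  | nil => simp
  | cons i rest ih =>
    rw [List.flatMap_cons, List.pairwise_append]
    refine ⟨List.pairwise_replicate.mpr (Or.inr le_rfl), ih h.of_cons, ?_⟩
    intro x hx y hy
    rw [List.eq_of_mem_replicate hx]
    rcases List.mem_flatMap.mp hy with ⟨j, hj, hyj⟩
    rw [List.eq_of_mem_replicate hyj]
    exact List.rel_of_pairwise_cons h hj

theorem pvDescList_perm (n : Int) : (pvDescList n).Perm (pvDigs n) := by
  rw [List.perm_iff_count]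
  intro a
  have hbnd := pvDigs_mem n.toNat n le_rfl
  unfold pvDescList
  by_cases ha : 0 ≤ a ∧ a ≤ 9
  · obtain ⟨h1, h2⟩ := ha
    interval_cases a <;> simp [List.count_replicate]
  · have hz : (pvDigs n).count a = 0 :=
      List.count_eq_zero.mpr (fun hm => ha (hbnd a hm))
    rw [hz]
    simp only [List.flatMap_cons, List.flatMap_nil, List.count_append, List.count_nil,
      List.count_replicate]
    have h0 : ∀ b : Int, (0 : Int) ≤ b → b ≤ 9 → (b == a) = false := by
      intro b hb1 hb2
      rw [beq_eq_false_iff_ne]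
      intro hba
      exact ha (by omega)
    rw [h0 9 (by norm_num) (by norm_num), h0 8 (by norm_num) (by norm_num),
      h0 7 (by norm_num) (by norm_num), h0 6 (by norm_num) (by norm_num),
      h0 5 (by norm_num) (by norm_num), h0 4 (by norm_num) (by norm_num),
      h0 3 (by norm_num) (by norm_num), h0 2 (by norm_num) (by norm_num),
      h0 1 (by norm_num) (by norm_num), h0 0 (by norm_num) (by norm_num)]
    simp
  
theorem pvB_sorted_eq (n : Int) :
    PySem.List.sorted (pvDigs n) (fun x => x) true = pvDescList n := by
  apply List.eq_of_perm_of_sorted (le := fun a b => b ≤ a)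
    (fun a b _ _ h1 h2 => le_antisymm h2 h1)
  · exact PySem.List.sorted_pairwise_rev (pvDigs n) (fun x => x)
  · exact pv_desc_pairwise _ _ (by decide)
  · exact (PySem.List.sorted_perm _ _ _).trans (pvDescList_perm n).symm

-- ===== VERDICT (by name: the statement is the Claim_ definition above) =====
theorem maxim_din_n_spec : Claim_equal_maxim_din_n := by
  intro n _
  unfold Spec_maxim_din_n maxim_din_n_alt
  by_cases h : n ≤ 0
  · rw [if_pos h, pvA_char]
    have hds : pvDigs n = [] := by rw [pvDigs_eq, if_neg (by omega)]
    unfold pvDescList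
    rw [hds]
    rfl
  · rw [if_neg h, pvA_char]
    show _ = (PySem.List.sorted (pvDigs n) (fun x => x) true).foldl _ _
    rw [pvB_sorted_eq]
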